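-- pv_equiv track=rewrite | github.com/huikinglam02gmail/Leetcode_solutions | 1977.number-of-ways-to-separate-numbers.py | commonSubstringLengthTable
-- ===== SOURCE A (Python) =====
-- def commonSubstringLengthTable(s):
--     n = len(s)
--     dp = [[0 for j in range(n)] for i in range(n)]
--     dp[n - 1][n - 1] = 1
--     for i in range(n - 2, -1, -1):
--         for j in range(i, n):
--             if s[i] == s[j]:
--                 dp[i][j] += 1
--                 if j + 1 < n:
--                     dp[i][j] += dp[i + 1][j + 1]
--     return dp
-- ===== SOURCE B (Python) =====
-- def scan(s, n, i, j):
--     k = 0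
--     while j + k < n and s[i + k] == s[j + k]:
--         k += 1
--     return k
--
--
-- def commonSubstringLengthTable(s):
--     n = len(s)
--     return [[scan(s, n, i, j) if i <= j else 0 for j in range(n)] for i in range(n)]
-- ===== Notes on version B (the rewrite author's own statement) =====
-- stated objective: simpler
-- what changed: Replaces the bottom-up DP recurrence (reverse row sweep reusing dp[i+1][j+1]) by a direct forward rescan: each entry dp[i][j] is the length of the common prefix of s[i:] and s[j:] bounded by the string end, computed independently by a while loop, built as a nested comprehension.
-- outside the precondition, e.g. on commonSubstringLengthTable(''): A raises IndexError, B returns []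
import Mathlib
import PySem

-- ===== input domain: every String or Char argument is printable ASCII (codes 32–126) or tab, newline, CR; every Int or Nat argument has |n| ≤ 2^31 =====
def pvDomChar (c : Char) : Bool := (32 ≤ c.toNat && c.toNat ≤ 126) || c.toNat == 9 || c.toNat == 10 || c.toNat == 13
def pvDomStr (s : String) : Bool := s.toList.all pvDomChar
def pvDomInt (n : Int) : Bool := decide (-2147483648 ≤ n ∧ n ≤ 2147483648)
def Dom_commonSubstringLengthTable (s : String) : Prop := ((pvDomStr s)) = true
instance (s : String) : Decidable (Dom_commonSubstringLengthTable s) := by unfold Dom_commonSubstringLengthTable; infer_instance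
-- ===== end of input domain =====

-- B replaces A's bottom-up DP recurrence by an independent forward rescan per cell; simpler, not faster.
-- Pre_ excludes only the empty string, on which A raises IndexError (B returns [] there).

-- ===== PORT A =====
-- dp[i][j] read/write with Python int indices (always in range on the admitted inputs)
def pvGet2 (dp : List (List Int)) (i j : Int) : Int :=
  PySem.List.pyGetD (PySem.List.pyGetD dp i []) j 0

def pvSet2 (dp : List (List Int)) (i j : Int) (v : Int) : List (List Int) :=
  PySem.List.pySetD dp i (PySem.List.pySetD (PySem.List.pyGetD dp i []) j v)

-- body of A's inner 'for j in range(i, n)' loop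
def pvInner (l : List Char) (n i : Int) (dp : List (List Int)) (j : Int) : List (List Int) :=
  if PySem.List.pyGetD l i ' ' == PySem.List.pyGetD l j ' ' then
    let dp1 := pvSet2 dp i j (pvGet2 dp i j + 1)
    if j + 1 < n then pvSet2 dp1 i j (pvGet2 dp1 i j + pvGet2 dp1 (i + 1) (j + 1)) else dp1
  else dp

-- body of A's outer 'for i in range(n - 2, -1, -1)' loop
def pvOuter (l : List Char) (n : Int) (dp : List (List Int)) (i : Int) : List (List Int) :=
  (PySem.List.pyRange i n 1).foldl (pvInner l n i) dp

def commonSubstringLengthTable (s : String) : List (List Int) :=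
  let l := s.toList
  let n : Int := PySem.Str.len s
  let dp0 := (PySem.List.pyRange 0 n 1).map (fun _ => (PySem.List.pyRange 0 n 1).map (fun _ => (0 : Int)))
  let dp1 := pvSet2 dp0 (n - 1) (n - 1) 1
  (PySem.List.pyRange (n - 2) (-1) (-1)).foldl (pvOuter l n) dp1

-- ===== PORT B =====
-- B's 'while j + k < n and s[i+k] == s[j+k]: k += 1' scan (both indices stay < n, so getD is exact)
def pvScan (l : List Char) (n i j k : Nat) : Nat :=
  if _h : j + k < n then
    if l.getD (i + k) ' ' == l.getD (j + k) ' ' then pvScan l n i j (k + 1) else k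
  else k
termination_by n - (j + k)
decreasing_by omega

def commonSubstringLengthTable_alt (s : String) : List (List Int) :=
  let l := s.toList
  let n := l.length
  (List.range n).map (fun i => (List.range n).map (fun j =>
    if i ≤ j then (pvScan l n i j 0 : Int) else 0))

-- ===== PRECONDITION & SPEC =====
-- Pre_ excludes only the empty string, on which A raises IndexError (dp[-1][-1] on the empty table).
def Pre_commonSubstringLengthTable (s : String) : Prop := s.toList ≠ []
instance (s : String) : Decidable (Pre_commonSubstringLengthTable s) := by
  unfold Pre_commonSubstringLengthTable; infer_instance

def pvWitness_commonSubstringLengthTable : String := "ab"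

def Spec_commonSubstringLengthTable (s : String) (out : List (List Int)) : Prop :=
  out = commonSubstringLengthTable_alt s
instance (s : String) (out : List (List Int)) : Decidable (Spec_commonSubstringLengthTable s out) := by
  unfold Spec_commonSubstringLengthTable; infer_instance

-- ===== CLAIM (what is proved, stated in full; the proofs are below) =====
def Claim_equal_commonSubstringLengthTable : Prop :=
  ∀ (s : String), Dom_commonSubstringLengthTable s → Pre_commonSubstringLengthTable s →
    Spec_commonSubstringLengthTable s (commonSubstringLengthTable s)

-- ===== LEMMAS AND PROOFS =====

-- an n×n grid given by an entry function
def pvGrid (n : Nat) (f : Nat → Nat → Int) : List (List Int) :=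
  (List.range n).map (fun i => (List.range n).map (f i))

-- the target table entry: B's value
def pvT (l : List Char) (i j : Nat) : Int :=
  if i ≤ j then (pvScan l l.length i j 0 : Int) else 0

-- state after A has processed all outer rows ≥ m
def pvDone (l : List Char) (m : Nat) : List (List Int) :=
  pvGrid l.length (fun r c => if m ≤ r then pvT l r c else 0)

-- state inside A's inner loop: rows > i done, row i done up to column cur
def pvPart (l : List Char) (i cur : Nat) : List (List Int) :=
  pvGrid l.length (fun r c => if i + 1 ≤ r ∨ (r = i ∧ c < cur) then pvT l r c else 0)

theorem pvGrid_congr {n : Nat} {f g : Nat → Nat → Int}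
    (h : ∀ i j, i < n → j < n → f i j = g i j) : pvGrid n f = pvGrid n g := by
  unfold pvGrid
  refine List.map_congr_left (fun i hi => ?_)
  refine List.map_congr_left (fun j hj => ?_)
  exact h i j (List.mem_range.mp hi) (List.mem_range.mp hj)

theorem pvGet2_grid {n : Nat} {f : Nat → Nat → Int} {i j : Nat} (hi : i < n) (hj : j < n) :
    pvGet2 (pvGrid n f) (i : Int) (j : Int) = f i j := by
  unfold pvGet2 pvGrid
  simp [PySem.List.pyGetD_natCast, List.getD, hi, hj]

theorem pvSet2_grid {n : Nat} {f : Nat → Nat → Int} {i j : Nat} (hi : i < n) (_hj : j < n) (v : Int) :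
    pvSet2 (pvGrid n f) (i : Int) (j : Int) v =
      pvGrid n (fun r c => if r = i ∧ c = j then v else f r c) := by
  unfold pvSet2 pvGrid
  simp only [PySem.List.pySetD_natCast, PySem.List.pyGetD_natCast]
  apply List.ext_getElem
  · simp
  · intro r h1 h2
    simp only [List.length_set, List.length_map, List.length_range] at h1
    simp only [List.getElem_set, List.getElem_map, List.getElem_range,
      List.getD, List.getElem?_map, List.getElem?_range, hi]
    by_cases hr : i = r
    · subst hr
      apply List.ext_getElem
      · simp
      · intro c hc1 hc2
        by_cases hcj : j = c
        · subst hcj; simp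
        · simp [hcj, Ne.symm hcj]
    · simp only [if_neg hr]
      have hri : ¬ (r = i) := fun h => hr h.symm
      apply List.ext_getElem
      · simp
      · intro c hc1 hc2
        simp [hri]

theorem pvScan_succ (l : List Char) (n i j k : Nat) :
    pvScan l n i j (k + 1) = pvScan l n (i + 1) (j + 1) k + 1 := by
  have H : ∀ m k, n - (j + 1 + k) ≤ m →
      pvScan l n i j (k + 1) = pvScan l n (i + 1) (j + 1) k + 1 := by
    intro m
    induction m with
    | zero =>
        intro k hk
        rw [pvScan, dif_neg (by omega), pvScan, dif_neg (by omega)]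
    | succ m ih =>
        intro k hk
        conv_lhs => rw [pvScan]
        conv_rhs => rw [pvScan]
        have e1 : i + 1 + k = i + (k + 1) := by omega
        have e2 : j + 1 + k = j + (k + 1) := by omega
        rw [e1, e2]
        by_cases hb : j + (k + 1) < n
        · rw [dif_pos hb, dif_pos hb]
          by_cases hc : (l.getD (i + (k + 1)) ' ' == l.getD (j + (k + 1)) ' ') = true
          · rw [if_pos hc, if_pos hc]
            exact ih (k + 1) (by omega)
          · rw [if_neg hc, if_neg hc]
        · rw [dif_neg hb, dif_neg hb]
  exact H (n - (j + 1 + k)) k le_rfl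

theorem pvScan_of_ge (l : List Char) {n j : Nat} (i k : Nat) (h : n ≤ j) :
    pvScan l n i j k = k := by
  rw [pvScan, dif_neg (by omega)]

theorem pvT_eq (l : List Char) {i j : Nat} (hij : i ≤ j) (hj : j < l.length) :
    pvT l i j = if l.getD i ' ' == l.getD j ' ' then pvT l (i + 1) (j + 1) + 1 else 0 := by
  unfold pvT
  rw [if_pos hij, if_pos (by omega : i + 1 ≤ j + 1), pvScan,
    dif_pos (by omega : j + 0 < l.length)]
  simp only [Nat.add_zero]
  by_cases hc : (l.getD i ' ' == l.getD j ' ') = true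
  · rw [if_pos hc, if_pos hc, pvScan_succ]
    push_cast
    ring
  · rw [if_neg hc, if_neg hc]
    rfl

theorem pvT_of_not_le (l : List Char) {i j : Nat} (h : ¬ i ≤ j) : pvT l i j = 0 := by
  simp [pvT, h]

theorem pvInner_step (l : List Char) {i j : Nat} (hij : i ≤ j) (hj : j < l.length) :
    pvInner l (l.length : Int) (i : Int) (pvPart l i j) (j : Int) = pvPart l i (j + 1) := by
  have hiL : i < l.length := lt_of_le_of_lt hij hj
  unfold pvInner
  simp only [PySem.List.pyGetD_natCast]
  by_cases hc : (l.getD i ' ' == l.getD j ' ') = true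
  · rw [if_pos hc]
    have hget : pvGet2 (pvPart l i j) (i : Int) (j : Int) = 0 := by
      unfold pvPart
      rw [pvGet2_grid hiL hj, if_neg (by omega)]
    rw [hget]
    unfold pvPart
    rw [pvSet2_grid hiL hj]
    by_cases hjn : (j : Int) + 1 < (l.length : Int)
    · rw [if_pos hjn]
      have hj1 : j + 1 < l.length := by exact_mod_cast hjn
      have hi1 : i + 1 < l.length := by omega
      have c1 : ((i : Int) + 1) = ((i + 1 : Nat) : Int) := by push_cast; ring
      have c2 : ((j : Int) + 1) = ((j + 1 : Nat) : Int) := by push_cast; ring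
      rw [c1, c2, pvGet2_grid hiL hj, pvGet2_grid hi1 hj1, pvSet2_grid hiL hj]
      have hT : pvT l i j = pvT l (i + 1) (j + 1) + 1 := by
        rw [pvT_eq l hij hj, if_pos hc]
      apply pvGrid_congr
      intro r c hr hcn
      by_cases h2 : r = i
      · subst h2
        by_cases h4 : c = j
        · subst h4
          split_ifs <;> first | rfl | omega
        · split_ifs <;> first | rfl | omega
      · split_ifs <;> first | rfl | omega
    · rw [if_neg hjn]
      have hj2 : j + 1 = l.length := by omega
      have hT : pvT l i j = 1 := by
        rw [pvT_eq l hij hj, if_pos hc]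
        unfold pvT
        rw [if_pos (by omega : i + 1 ≤ j + 1), ← hj2, pvScan_of_ge l (i + 1) 0 le_rfl]
        norm_num
      apply pvGrid_congr
      intro r c hr hcn
      by_cases h2 : r = i
      · subst h2
        by_cases h4 : c = j
        · subst h4
          split_ifs <;> first | rfl | omega
        · split_ifs <;> first | rfl | omega
      · split_ifs <;> first | rfl | omega
  · rw [if_neg hc]
    unfold pvPart
    have hT : pvT l i j = 0 := by
      rw [pvT_eq l hij hj, if_neg hc]
    apply pvGrid_congr
    intro r c hr hcn
    by_cases h2 : r = i
    · subst h2
      by_cases h4 : c = j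
      · subst h4
        split_ifs <;> first | rfl | omega
      · split_ifs <;> first | rfl | omega
    · split_ifs <;> first | rfl | omega

theorem pvInner_fold (l : List Char) (i : Nat) :
    ∀ j : Nat, i ≤ j → j ≤ l.length →
      (PySem.List.pyRange (j : Int) (l.length : Int) 1).foldl
          (pvInner l (l.length : Int) (i : Int)) (pvPart l i j) = pvPart l i l.length := by
  have H : ∀ (m j : Nat), i ≤ j → j ≤ l.length → l.length - j ≤ m →
      (PySem.List.pyRange (j : Int) (l.length : Int) 1).foldl
        (pvInner l (l.length : Int) (i : Int)) (pvPart l i j) = pvPart l i l.length := by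
    intro m
    induction m with
    | zero =>
        intro j hij hjL hm
        have hj : j = l.length := by omega
        subst hj
        rw [PySem.List.pyRange_one_eq_nil le_rfl]
        rfl
    | succ m ih =>
        intro j hij hjL hm
        by_cases hj : j < l.length
        · rw [PySem.List.pyRange_one_cons (by exact_mod_cast hj), List.foldl_cons,
            pvInner_step l hij hj,
            (by push_cast; ring : ((j : Int) + 1) = ((j + 1 : Nat) : Int))]
          exact ih (j + 1) (by omega) (by omega) (by omega)
        · have hje : j = l.length := by omega
          subst hje
          rw [PySem.List.pyRange_one_eq_nil le_rfl]
          rfl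
  exact fun j hij hjL => H (l.length - j) j hij hjL le_rfl

theorem pvOuter_step (l : List Char) {i : Nat} (hi : i < l.length) :
    pvOuter l (l.length : Int) (pvDone l (i + 1)) (i : Int) = pvDone l i := by
  unfold pvOuter
  have h1 : pvDone l (i + 1) = pvPart l i i := by
    unfold pvDone pvPart
    apply pvGrid_congr
    intro r c hr hc
    split_ifs <;> first | rfl | omega | (rw [pvT_of_not_le l (by omega)])
  have h2 : pvPart l i l.length = pvDone l i := by
    unfold pvDone pvPart
    apply pvGrid_congr
    intro r c hr hc
    split_ifs <;> first | rfl | omega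
  rw [h1, pvInner_fold l i i le_rfl (by omega), h2]

theorem pvOuter_fold (l : List Char) :
    ∀ m : Nat, m ≤ l.length →
      (PySem.List.pyRange ((m : Int) - 1) (-1) (-1)).foldl
          (pvOuter l (l.length : Int)) (pvDone l m) = pvDone l 0 := by
  intro m
  induction m with
  | zero =>
      intro _
      rw [(by norm_num : ((0 : Nat) : Int) - 1 = -1), PySem.List.pyRange_neg_one_eq_nil le_rfl]
      rfl
  | succ m ih =>
      intro hm
      rw [(by push_cast; ring : ((m + 1 : Nat) : Int) - 1 = (m : Int)),
        PySem.List.pyRange_neg_one_cons (by omega : (-1 : Int) < (m : Int)), List.foldl_cons,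
        pvOuter_step l (by omega : m < l.length)]
      exact ih (by omega)

theorem pvAlt_eq (s : String) :
    commonSubstringLengthTable_alt s = pvGrid s.toList.length (pvT s.toList) := by
  rfl

theorem pvT_last (l : List Char) (hL : 0 < l.length) :
    pvT l (l.length - 1) (l.length - 1) = 1 := by
  unfold pvT
  rw [if_pos le_rfl, pvScan, dif_pos (by omega),
    if_pos (by simp : (l.getD (l.length - 1 + 0) ' ' == l.getD (l.length - 1 + 0) ' ') = true),
    pvScan, dif_neg (by omega)]
  norm_num

-- ===== VERDICT (by name: the statement is the Claim_ definition above) =====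
theorem commonSubstringLengthTable_spec : Claim_equal_commonSubstringLengthTable := by
  intro s _ hpre
  unfold Spec_commonSubstringLengthTable
  have hL : 0 < s.toList.length := List.length_pos_of_ne_nil hpre
  rw [pvAlt_eq]
  unfold commonSubstringLengthTable
  dsimp only
  rw [PySem.Str.len_eq]
  have hconst : ∀ {α : Type} (x : α),
      (PySem.List.pyRange 0 ((s.toList.length : Nat) : Int) 1).map (fun _ => x) =
        (List.range s.toList.length).map (fun _ => x) := by
    intro α x
    rw [PySem.List.pyRange_one, List.map_map, Int.sub_zero, Int.toNat_natCast]
    rfl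
  simp only [hconst]
  rw [(by omega : ((s.toList.length : Nat) : Int) - 1 = ((s.toList.length - 1 : Nat) : Int))]
  have hgrid0 : (List.range s.toList.length).map
      (fun _ => (List.range s.toList.length).map (fun _ => (0 : Int))) =
      pvGrid s.toList.length (fun _ _ => (0 : Int)) := rfl
  rw [hgrid0, pvSet2_grid (by omega) (by omega) 1]
  have hbase : pvGrid s.toList.length
      (fun r c => if r = s.toList.length - 1 ∧ c = s.toList.length - 1 then 1
        else (fun _ _ => (0 : Int)) r c) = pvDone s.toList (s.toList.length - 1) := by
    unfold pvDone
    apply pvGrid_congr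
    intro r c hr hc
    dsimp only
    by_cases h2 : r = s.toList.length - 1
    · subst h2
      by_cases h4 : c = s.toList.length - 1
      · subst h4
        rw [if_pos ⟨rfl, rfl⟩, if_pos (by omega), pvT_last s.toList hL]
      · rw [if_neg (by omega), if_pos (by omega), pvT_of_not_le s.toList (by omega)]
    · rw [if_neg (by omega), if_neg (by omega)]
  rw [hbase,
    (by rw [Nat.cast_sub (by omega : 1 ≤ s.toList.length)]; ring :
      ((s.toList.length : Nat) : Int) - 2 = ((s.toList.length - 1 : Nat) : Int) - 1),
    pvOuter_fold s.toList (s.toList.length - 1) (by omega)]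
  unfold pvDone
  apply pvGrid_congr
  intro r c hr hc
  rw [if_pos (Nat.zero_le r)]
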